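-- pv_equiv track=rewrite | github.com/AJMoore4/sports_oracle_project | sports_oracle/collectors/odds_collector.py | _normalize_cache_label
-- ===== SOURCE A (Python) =====
-- from typing import Optional
--
-- def _normalize_cache_label(value: Optional[str]) -> str:
--     if value is None:
--         return "all"
--     cleaned = "".join(
--         ch.lower() if ch.isalnum() else "_"
--         for ch in str(value).strip()
--     )
--     while "__" in cleaned:
--         cleaned = cleaned.replace("__", "_")
--     return cleaned.strip("_") or "all"
-- ===== SOURCE B (Python) =====
-- from typing import Optional
--
-- def _normalize_cache_label(value: Optional[str]) -> str:
--     if value is None: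
--         return "all"
--     words = []
--     cur = ""
--     for ch in str(value).strip():
--         if ch.isalnum():
--             cur += ch.lower()
--         elif cur:
--             words.append(cur)
--             cur = ""
--     if cur:
--         words.append(cur)
--     return "_".join(words) or "all"
-- ===== Notes on version B (the rewrite author's own statement) =====
-- stated objective: simpler
-- what changed: Replaces A's pipeline (map every char to underscore-or-lowercase, fixpoint-collapse repeated underscores via replace, then strip edge underscores) by a single pass that accumulates maximal alphanumeric runs as lowercased words and joins them with single underscores.
import Mathlib
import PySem

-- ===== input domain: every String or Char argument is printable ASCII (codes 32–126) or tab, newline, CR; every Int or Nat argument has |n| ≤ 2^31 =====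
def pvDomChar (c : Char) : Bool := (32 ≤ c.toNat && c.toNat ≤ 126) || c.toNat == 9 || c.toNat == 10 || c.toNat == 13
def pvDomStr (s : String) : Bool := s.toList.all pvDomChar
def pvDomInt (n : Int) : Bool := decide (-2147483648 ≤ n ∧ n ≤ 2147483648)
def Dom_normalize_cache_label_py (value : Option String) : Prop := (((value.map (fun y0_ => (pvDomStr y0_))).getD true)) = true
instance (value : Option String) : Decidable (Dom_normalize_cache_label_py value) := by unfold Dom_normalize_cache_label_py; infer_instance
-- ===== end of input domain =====

-- B replaces A's pipeline (char-map, fixpoint-collapse of repeated underscores, edge strip)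
-- by one pass collecting lowercased alphanumeric runs and joining them (simpler decomposition).


-- ===== PORT A =====
-- helpers needed by the port itself: the termination of A's 'while "__" in cleaned' loop.
-- repUU is Python's cleaned.replace("__", "_") as a structural recursion; it is proved
-- equal to PySem.Chars.replace and strictly shortening when "__" occurs.
def repUU : List Char → List Char
  | [] => []
  | '_' :: '_' :: t => '_' :: repUU t
  | c :: t => c :: repUU t
def headIsU : List Char → Bool
  | [] => false
  | c :: _ => c == '_'
theorem repUU_nil : repUU [] = [] := rfl
theorem repUU_uu (t : List Char) : repUU ('_' :: '_' :: t) = '_' :: repUU t := rfl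
theorem repUU_cons_of (c : Char) (t : List Char) (h : ¬(c = '_' ∧ headIsU t = true)) :
    repUU (c :: t) = c :: repUU t := by
  rw [repUU.eq_def]; split <;> simp_all [headIsU]
theorem repUU_length_le (l : List Char) : (repUU l).length ≤ l.length := by
  fun_induction repUU <;> simp_all <;> omega
theorem repUU_length_lt (l : List Char) (h : ['_','_'] <:+: l) :
    (repUU l).length < l.length := by
  fun_induction repUU with
  | case1 => simp at h
  | case2 t ih => have := repUU_length_le t; simp; omega
  | case3 c t hne ih =>
    have ht : ['_','_'] <:+: t := by
      rcases (List.infix_cons_iff.mp h) with hp | hi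
      · rcases hp with ⟨r, hr⟩
        cases t with
        | nil => simp at hr
        | cons d t' =>
          simp only [List.cons.injEq, List.cons_append, List.nil_append] at hr
          exact absurd (hne (t' ) hr.1.symm (by simp [← hr.2.1])) (fun f => f)
      · exact hi
    have := ih ht
    simp; omega
theorem go_eq_repUU (fuel : Nat) : ∀ (l acc : List Char), l.length ≤ fuel →
    PySem.Chars.replace.go ['_','_'] ['_'] fuel l acc = acc.reverse ++ repUU l := by
  induction fuel with
  | zero =>
    intro l acc h
    have : l = [] := by cases l <;> simp_all
    subst this
    simp [PySem.Chars.replace.go, repUU_nil]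
  | succ n ih =>
    intro l acc h
    cases l with
    | nil => simp [PySem.Chars.replace.go, repUU_nil]
    | cons c t =>
      rw [PySem.Chars.replace.go]
      by_cases hp : List.isPrefixOf ['_','_'] (c :: t)
      · rw [if_pos hp]
        obtain ⟨hc, t', ht⟩ : c = '_' ∧ ∃ t', t = '_' :: t' := by
          cases t with
          | nil => simp [List.isPrefixOf] at hp
          | cons d t' =>
            simp [List.isPrefixOf] at hp
            exact ⟨hp.1.symm, t', by rw [hp.2]⟩
        subst hc ht
        simp only [List.length_cons, List.drop_succ_cons, List.reverse_cons,
          List.reverse_nil, List.nil_append]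
        simp only [List.length_nil, List.drop_zero, List.singleton_append]
        rw [ih t' ('_' :: acc) (by simp at h; omega)]
        simp [repUU_uu]
      · rw [if_neg hp]
        rw [ih t (c :: acc) (by simp at h; omega)]
        have : repUU (c :: t) = c :: repUU t := by
          apply repUU_cons_of
          rintro ⟨hc, hu⟩
          apply hp
          cases t with
          | nil => simp [headIsU] at hu
          | cons d t' =>
            simp [headIsU] at hu
            subst hc hu
            simp [List.isPrefixOf]
        simp [this]
theorem replace_uu_eq (l : List Char) :
    PySem.Chars.replace l ['_','_'] ['_'] = repUU l := by
  rw [PySem.Chars.replace, if_neg (by simp)]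
  exact go_eq_repUU l.length l [] (le_refl _)

theorem replace_uu_length_lt (l : List Char)
    (h : PySem.Chars.isIn ['_','_'] l = true) :
    (PySem.Chars.replace l ['_','_'] ['_']).length < l.length := by
  rw [replace_uu_eq]
  exact repUU_length_lt l ((PySem.Chars.isIn_iff_infix _ _).mp h)

def collapseA (l : List Char) : List Char :=
  if h : PySem.Chars.isIn ['_','_'] l = true then
    collapseA (PySem.Chars.replace l ['_','_'] ['_'])
  else l
termination_by l.length
decreasing_by exact replace_uu_length_lt l h

def normalize_cache_label_py (value : Option String) : String :=
  match value with
  | none => "all"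
  | some v =>
    let cleaned : List Char :=
      (PySem.Chars.strip v.toList).map
        (fun ch => if PySem.Chars.isalnum ch then PySem.Chars.lowerChar ch else '_')
    let cleaned := collapseA cleaned
    let r := PySem.Chars.stripChars cleaned ['_']
    if r = [] then "all" else String.ofList r


-- ===== PORT B =====
def normalize_cache_label_py_alt (value : Option String) : String :=
  match value with
  | none => "all"
  | some v =>
    let s := PySem.Chars.strip v.toList
    let st : List (List Char) × List Char :=
      s.foldl (fun st ch =>
        if PySem.Chars.isalnum ch then (st.1, st.2 ++ [PySem.Chars.lowerChar ch])
        else if st.2 ≠ [] then (st.1 ++ [st.2], []) else st) ([], [])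
    let words := if st.2 ≠ [] then st.1 ++ [st.2] else st.1
    let r := PySem.Chars.join ['_'] words
    if r = [] then "all" else String.ofList r


-- ===== PRECONDITION & SPEC =====
def Spec_normalize_cache_label_py (value : Option String) (out : String) : Prop := out = normalize_cache_label_py_alt value
instance (value : Option String) (out : String) : Decidable (Spec_normalize_cache_label_py value out) := by unfold Spec_normalize_cache_label_py; infer_instance

-- ===== CLAIM (what is proved, stated in full; the proofs are below) =====
def Claim_equal_normalize_cache_label_py : Prop := ∀ (value : Option String), Dom_normalize_cache_label_py value → Spec_normalize_cache_label_py value (normalize_cache_label_py value)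

-- ===== LEMMAS AND PROOFS =====

theorem headU_repUU (l : List Char) : headIsU (repUU l) = headIsU l := by
  fun_induction repUU <;> simp_all [headIsU]
def squeezeU : List Char → List Char
  | [] => []
  | [c] => [c]
  | '_' :: '_' :: t => squeezeU ('_' :: t)
  | c :: t => c :: squeezeU t

-- squeezeU equations
theorem squeezeU_single (c : Char) : squeezeU [c] = [c] := by
  rw [squeezeU.eq_def]
theorem squeezeU_uu (t : List Char) : squeezeU ('_' :: '_' :: t) = squeezeU ('_' :: t) := rfl
theorem squeezeU_cons_ne (c : Char) (t : List Char) (h : ¬(c = '_' ∧ headIsU t = true)) :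
    squeezeU (c :: t) = c :: squeezeU t := by
  rw [squeezeU.eq_def]
  cases t with
  | nil => rfl
  | cons d t' =>
    split <;> simp_all [headIsU]

theorem squeezeU_cons (c : Char) (l : List Char) :
    squeezeU (c :: l) = if c = '_' ∧ headIsU l = true then squeezeU l else c :: squeezeU l := by
  by_cases h : c = '_' ∧ headIsU l = true
  · rw [if_pos h]
    obtain ⟨hc, hu⟩ := h
    subst hc
    cases l with
    | nil => simp [headIsU] at hu
    | cons d t =>
      have : d = '_' := by simpa [headIsU] using hu
      subst this
      exact squeezeU_uu t
  · rw [if_neg h]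
    exact squeezeU_cons_ne c l h

theorem squeezeU_repUU (l : List Char) : squeezeU (repUU l) = squeezeU l := by
  fun_induction repUU with
  | case1 => rfl
  | case2 t ih =>
    rw [squeezeU_uu, squeezeU_cons '_' (repUU t), squeezeU_cons '_' t, headU_repUU, ih]
  | case3 c t hne ih =>
    have h' : ¬(c = '_' ∧ headIsU t = true) := by
      rintro ⟨hc, hu⟩
      cases t with
      | nil => simp [headIsU] at hu
      | cons d t' => exact hne t' hc (by simpa [headIsU] using hu)
    rw [squeezeU_cons_ne c t h']
    rw [squeezeU_cons_ne c (repUU t) (by rw [headU_repUU] at *; exact h'), ih]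

theorem squeezeU_fix (l : List Char) (h : ¬(['_','_'] <:+: l)) : squeezeU l = l := by
  induction l with
  | nil => rfl
  | cons c t ih =>
    have hne : ¬(c = '_' ∧ headIsU t = true) := by
      rintro ⟨hc, hu⟩
      cases t with
      | nil => simp [headIsU] at hu
      | cons d t' =>
        have : d = '_' := by simpa [headIsU] using hu
        exact h (by subst hc this; exact ⟨[], t', rfl⟩)
    rw [squeezeU_cons_ne c t hne, ih (fun hi => h (List.infix_cons hi))]

theorem squeezeU_append_nonU (x m : List Char) (hx : ∀ a ∈ x, a ≠ '_') :
    squeezeU (x ++ m) = x ++ squeezeU m := by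
  induction x with
  | nil => rfl
  | cons a x' ih =>
    have ha : a ≠ '_' := hx a (by simp)
    rw [List.cons_append, squeezeU_cons_ne a _ (by rintro ⟨hc, _⟩; exact ha hc),
      ih (fun b hb => hx b (by simp [hb]))]
    simp
theorem collapseA_eq (l : List Char) : collapseA l = squeezeU l := by
  fun_induction collapseA with
  | case1 l h ih => rw [ih, replace_uu_eq, squeezeU_repUU]
  | case2 l h =>
    exact (squeezeU_fix l (fun hi => h ((PySem.Chars.isIn_iff_infix _ _).mpr hi))).symm

-- character facts
theorem char_le_iff (a b : Char) : a ≤ b ↔ a.toNat ≤ b.toNat := ge_iff_le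

theorem lowerChar_ne_U (c : Char) (h : PySem.Chars.isalnum c = true) :
    PySem.Chars.lowerChar c ≠ '_' := by
  simp only [PySem.Chars.isalnum, PySem.Chars.isalpha, PySem.Chars.isupper, PySem.Chars.islower,
    PySem.Chars.isdigit, Bool.or_eq_true, Bool.and_eq_true, decide_eq_true_eq, char_le_iff] at h
  simp only [show ('A':Char).toNat = 65 from rfl, show ('Z':Char).toNat = 90 from rfl,
      show ('a':Char).toNat = 97 from rfl, show ('z':Char).toNat = 122 from rfl,
      show ('0':Char).toNat = 48 from rfl, show ('9':Char).toNat = 57 from rfl] at h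
  intro he
  have h95 : (PySem.Chars.lowerChar c).toNat = 95 := by rw [he]; rfl
  unfold PySem.Chars.lowerChar at h95
  by_cases hu : PySem.Chars.isupper c = true
  · rw [if_pos hu] at h95
    have hb : 65 ≤ c.toNat ∧ c.toNat ≤ 90 := by
      simpa [PySem.Chars.isupper, char_le_iff, show ('A':Char).toNat = 65 from rfl,
        show ('Z':Char).toNat = 90 from rfl] using hu
    rw [Char.toNat_ofNat, if_pos (Or.inl (by omega))] at h95
    omega
  · rw [if_neg hu] at h95
    have hnu : ¬(65 ≤ c.toNat ∧ c.toNat ≤ 90) := by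
      simpa [PySem.Chars.isupper, char_le_iff, show ('A':Char).toNat = 65 from rfl,
        show ('Z':Char).toNat = 90 from rfl] using hu
    rcases h with (h | h) | h <;> omega

def fA (c : Char) : Char := if PySem.Chars.isalnum c then PySem.Chars.lowerChar c else '_'

def toksAux : List Char → List Char → List (List Char)
  | cur, [] => if cur = [] then [] else [cur]
  | cur, ch :: t =>
    if PySem.Chars.isalnum ch then toksAux (cur ++ [PySem.Chars.lowerChar ch]) t
    else if cur = [] then toksAux [] t else cur :: toksAux [] t

def joinU : List (List Char) → List Char
  | [] => []
  | [v] => v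
  | v :: ws => v ++ '_' :: joinU ws

def padLead (ws : List (List Char)) (lead trail : Bool) : List Char :=
  match ws with
  | [] => if lead || trail then ['_'] else []
  | _ => (if lead then ['_'] else []) ++ joinU ws ++ (if trail then ['_'] else [])

def leadNon : List Char → Bool
  | [] => false
  | c :: _ => !PySem.Chars.isalnum c

def trailNon (s : List Char) : Bool := leadNon s.reverse

theorem fA_eq_U_iff (c : Char) : (fA c == '_') = !PySem.Chars.isalnum c := by
  unfold fA
  by_cases h : PySem.Chars.isalnum c = true
  · simp [h, lowerChar_ne_U c h]
  · have h' : PySem.Chars.isalnum c = false := by simpa using h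
    simp [h']

theorem headU_map_fA (t : List Char) : headIsU (t.map fA) = leadNon t := by
  cases t with
  | nil => rfl
  | cons c t' => simp [headIsU, leadNon, fA_eq_U_iff]

theorem toksAux_ne_nil (cur : List Char) (s : List Char) (h : cur ≠ []) :
    toksAux cur s ≠ [] := by
  induction s generalizing cur with
  | nil => simp [toksAux, h]
  | cons ch t ih =>
    unfold toksAux
    by_cases ha : PySem.Chars.isalnum ch = true
    · simp [ha]; exact ih _ (by simp)
    · simp [ha, h]

theorem toksAux_nil_all (r : List Char) (h : toksAux [] r = []) :
    ∀ c ∈ r, PySem.Chars.isalnum c = false := by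
  induction r with
  | nil => simp
  | cons c t ih =>
    unfold toksAux at h
    by_cases ha : PySem.Chars.isalnum c = true
    · simp [ha] at h
      exact absurd h (toksAux_ne_nil _ _ (by simp))
    · simp [ha] at h
      intro d hd
      rcases List.mem_cons.mp hd with hd | hd
      · subst hd; simpa using ha
      · exact ih h d hd

theorem toksAux_append_alnum (w : List Char) (hw : ∀ a ∈ w, PySem.Chars.isalnum a = true)
    (cur r : List Char) : toksAux cur (w ++ r) = toksAux (cur ++ w.map PySem.Chars.lowerChar) r := by
  induction w generalizing cur with
  | nil => simp
  | cons a w' ih =>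
    have ha := hw a (by simp)
    rw [List.cons_append,
      show toksAux cur (a :: (w' ++ r)) = toksAux (cur ++ [PySem.Chars.lowerChar a]) (w' ++ r) by
        rw [toksAux.eq_def]; simp [ha],
      ih (fun b hb => hw b (by simp [hb]))]
    simp

theorem words_ok (s : List Char) : ∀ (cur : List Char), (∀ a ∈ cur, a ≠ '_') →
    ∀ w ∈ toksAux cur s, w ≠ [] ∧ ∀ a ∈ w, a ≠ '_' := by
  induction s with
  | nil =>
    intro cur hc w hw
    unfold toksAux at hw
    by_cases h : cur = []
    · simp [h] at hw
    · simp [h] at hw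
      exact ⟨hw ▸ h, hw ▸ hc⟩
  | cons ch t ih =>
    intro cur hc w hw
    unfold toksAux at hw
    by_cases ha : PySem.Chars.isalnum ch = true
    · simp only [ha, if_true] at hw
      refine ih _ ?_ w hw
      intro a haa
      rcases List.mem_append.mp haa with h | h
      · exact hc a h
      · simp at h; subst h; exact lowerChar_ne_U ch ha
    · simp only [ha, Bool.false_eq_true, if_false] at hw
      by_cases h : cur = []
      · simp [h] at hw
        exact ih [] (by simp) w hw
      · simp [h] at hw
        rcases hw with hw | hw
        · exact ⟨hw ▸ h, hw ▸ hc⟩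
        · exact ih [] (by simp) w hw

theorem joinU_cons (v : List Char) (ws : List (List Char)) (h : ws ≠ []) :
    joinU (v :: ws) = v ++ '_' :: joinU ws := by
  cases ws with
  | nil => simp at h
  | cons w ws' => rfl

theorem pad_true (ws : List (List Char)) (h : ws ≠ []) (tr : Bool) :
    padLead ws true tr = '_' :: padLead ws false tr := by
  cases ws with
  | nil => simp at h
  | cons v ws' => simp [padLead]

theorem pad_cons (v : List Char) (ws : List (List Char)) (tr : Bool) (h : ws = [] → tr = true) :
    padLead (v :: ws) false tr = v ++ padLead ws true tr := by
  cases ws with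
  | nil => simp [padLead, joinU, h rfl]
  | cons w ws' =>
    simp [padLead, joinU_cons v (w :: ws') (by simp)]

theorem leadNon_append (x y : List Char) (hx : x ≠ []) : leadNon (x ++ y) = leadNon x := by
  cases x with
  | nil => simp at hx
  | cons a t => rfl

theorem trailNon_cons (c : Char) (t : List Char) (h : t ≠ []) : trailNon (c :: t) = trailNon t := by
  unfold trailNon
  rw [List.reverse_cons, leadNon_append _ _ (by simpa using h)]

theorem trailNon_append (w r : List Char) (h : r ≠ []) : trailNon (w ++ r) = trailNon r := by
  unfold trailNon
  rw [List.reverse_append, leadNon_append _ _ (by simpa using h)]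

theorem trailNon_all_alnum (w : List Char) (h : w ≠ []) (ha : ∀ a ∈ w, PySem.Chars.isalnum a = true) :
    trailNon w = false := by
  unfold trailNon
  cases hrev : w.reverse with
  | nil => simp_all
  | cons a t =>
    have : a ∈ w := by
      rw [← List.mem_reverse, hrev]; simp
    simp [leadNon, ha a this]

theorem trailNon_all_non (r : List Char) (h : r ≠ []) (ha : ∀ a ∈ r, PySem.Chars.isalnum a = false) :
    trailNon r = true := by
  unfold trailNon
  cases hrev : r.reverse with
  | nil => simp_all
  | cons a t =>
    have : a ∈ r := by
      rw [← List.mem_reverse, hrev]; simp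
    simp [leadNon, ha a this]

theorem toksAux_nil_cons_non (d : Char) (t : List Char) (h : PySem.Chars.isalnum d = false) :
    toksAux [] (d :: t) = toksAux [] t := by
  rw [toksAux.eq_def]; simp [h]

theorem toksAux_cons_non (cur : List Char) (d : Char) (t : List Char)
    (hc : cur ≠ []) (h : PySem.Chars.isalnum d = false) :
    toksAux cur (d :: t) = cur :: toksAux [] t := by
  rw [toksAux.eq_def]; simp [h, hc]

theorem main_pad (n : Nat) : ∀ s : List Char, s.length ≤ n →
    squeezeU (s.map fA) = padLead (toksAux [] s) (leadNon s) (trailNon s) := by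
  induction n with
  | zero =>
    intro s hs
    have : s = [] := by cases s <;> simp_all
    subst this
    rfl
  | succ n ih =>
    intro s hs
    cases s with
    | nil => rfl
    | cons c t =>
      by_cases ha : PySem.Chars.isalnum c = true
      · -- word starts: peel w = takeWhile alnum s
        set s := c :: t with hsdef
        have hs0 : s ≠ [] := by simp [hsdef]
        set w := s.takeWhile PySem.Chars.isalnum with hw
        set r := s.dropWhile PySem.Chars.isalnum with hr
        have hwr : w ++ r = s := List.takeWhile_append_dropWhile
        have hwal : ∀ a ∈ w, PySem.Chars.isalnum a = true := fun a haa => List.mem_takeWhile_imp haa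
        have hwne : w ≠ [] := by
          rw [hw, hsdef]
          simp [ha]
        have hmapw : w.map fA = w.map PySem.Chars.lowerChar :=
          List.map_congr_left (fun a haa => by simp [fA, hwal a haa])
        have hnonU : ∀ a ∈ w.map PySem.Chars.lowerChar, a ≠ '_' := by
          intro a haa
          rcases List.mem_map.mp haa with ⟨b, hb, hba⟩
          exact hba ▸ lowerChar_ne_U b (hwal b hb)
        have hrlen : r.length ≤ n := by
          have : w.length + r.length = s.length := by rw [← hwr]; simp
          have : s.length ≤ n + 1 := hs
          have hwl : 0 < w.length := List.length_pos_iff.mpr hwne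
          omega
        have hlhs : squeezeU (s.map fA) =
            w.map PySem.Chars.lowerChar ++ squeezeU (r.map fA) := by
          rw [← hwr, List.map_append, hmapw, squeezeU_append_nonU _ _ hnonU]
        have htoks : toksAux [] s = toksAux (w.map PySem.Chars.lowerChar) r := by
          rw [← hwr, toksAux_append_alnum w hwal [] r]
          simp
        have hlead : leadNon s = false := by simp [hsdef, leadNon, ha]
        cases hrc : r with
        | nil =>
          have hsw : s = w := by rw [← hwr, hrc]; simp
          rw [hlhs, ih r hrlen, hrc, htoks, hrc, hlead]
          rw [show toksAux (w.map PySem.Chars.lowerChar) [] = [w.map PySem.Chars.lowerChar] by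
            rw [toksAux.eq_def]; simp [hwne]]
          have htr : trailNon s = false := by
            rw [hsw]; exact trailNon_all_alnum w hwne hwal
          rw [htr]
          rw [show toksAux [] ([] : List Char) = [] from by rw [toksAux.eq_def]; simp]
          simp [padLead, leadNon, trailNon, joinU]
        | cons d t' =>
          have had : PySem.Chars.isalnum d = false := by
            have h1 : s.dropWhile PySem.Chars.isalnum = d :: t' := by rw [← hr]; exact hrc
            have h2 := List.head_dropWhile_not PySem.Chars.isalnum (l := s) (by rw [h1]; simp)
            simp only [h1, List.head_cons] at h2
            simpa using h2
          have hmw : w.map PySem.Chars.lowerChar ≠ [] := by simpa using hwne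
          rw [hlhs, ih r hrlen, htoks, hrc, toksAux_cons_non _ d t' hmw had, hlead]
          rw [toksAux_nil_cons_non d t' had]
          have hleadr : leadNon r = true := by rw [hrc]; simp [leadNon, had]
          have htrs : trailNon s = trailNon r := by
            rw [← hwr, trailNon_append _ _ (by rw [hrc]; simp)]
          rw [← hrc, hleadr, htrs]
          rw [pad_cons _ _ _ ?side]
          case side =>
            intro hnil
            apply trailNon_all_non r (by rw [hrc]; simp)
            intro a haa
            rw [hrc] at haa
            rcases List.mem_cons.mp haa with h1 | h1
            · exact h1 ▸ had
            · exact toksAux_nil_all t' hnil a h1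
      · -- non-alnum head
        have ha' : PySem.Chars.isalnum c = false := by simpa using ha
        have hfc : fA c = '_' := by simp [fA, ha']
        have hlead : leadNon (c :: t) = true := by simp [leadNon, ha']
        rw [toksAux_nil_cons_non c t ha']
        cases t with
        | nil => simp [hfc, squeezeU_single, toksAux, padLead, trailNon, leadNon, ha']
        | cons d t' =>
          have htr : trailNon (c :: d :: t') = trailNon (d :: t') := trailNon_cons c _ (by simp)
          rw [List.map_cons, hfc, squeezeU_cons, headU_map_fA, htr, hlead]
          by_cases hld : leadNon (d :: t') = true
          · rw [if_pos ⟨rfl, hld⟩, ih _ (by simpa using Nat.le_of_succ_le_succ hs), hld]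
          · have hld' : leadNon (d :: t') = false := by simpa using hld
            have hdal : PySem.Chars.isalnum d = true := by
              simpa [leadNon] using hld'
            have hne : toksAux [] (d :: t') ≠ [] := by
              rw [toksAux.eq_def]
              simp [hdal]
              exact toksAux_ne_nil _ _ (by simp)
            rw [if_neg (by simp [hld']), ih _ (by simpa using Nat.le_of_succ_le_succ hs), hld']
            rw [pad_true _ hne]

theorem joinU_cons_general (v : List Char) (ws : List (List Char)) :
    joinU (v :: ws) = v ++ (if ws = [] then [] else '_' :: joinU ws) := by
  cases ws with
  | nil => simp [joinU]
  | cons w ws' =>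
    rw [joinU_cons v (w :: ws') (by simp)]
    simp

theorem joinU_eq_intercalate (ws : List (List Char)) :
    List.intercalate ['_'] ws = joinU ws := by
  induction ws with
  | nil => rfl
  | cons v ws' ih =>
    cases ws' with
    | nil => simp [List.intercalate, joinU]
    | cons w t =>
      rw [joinU_cons v _ (by simp), ← ih]
      simp [List.intercalate, List.intersperse_cons₂]

theorem joinU_append_single (ws : List (List Char)) (u : List Char) (h : ws ≠ []) :
    joinU (ws ++ [u]) = joinU ws ++ '_' :: u := by
  induction ws with
  | nil => simp at h
  | cons v ws' ih =>
    cases ws' with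
    | nil => simp [joinU]
    | cons w t =>
      rw [List.cons_append, joinU_cons v _ (by simp), joinU_cons v _ (by simp),
        ih (by simp)]
      simp

theorem joinU_reverse (ws : List (List Char)) :
    (joinU ws).reverse = joinU ((ws.map List.reverse).reverse) := by
  induction ws with
  | nil => rfl
  | cons v ws' ih =>
    cases ws' with
    | nil => simp [joinU]
    | cons w t =>
      have h1 : joinU (v :: w :: t) = v ++ '_' :: joinU (w :: t) := joinU_cons _ _ (by simp)
      have h2 : ((v :: w :: t).map List.reverse).reverse
          = ((w :: t).map List.reverse).reverse ++ [v.reverse] := by simp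
      rw [h1, h2, joinU_append_single _ _ (by simp), ← ih]
      simp

def pU : Char → Bool := fun c => (['_'] : List Char).contains c

theorem pU_eq (c : Char) : pU c = (c == '_') := by
  show (['_'] : List Char).contains c = (c == '_')
  rw [List.contains_cons]
  simp

theorem dropWhile_pU_joinU (ws : List (List Char)) (y : List Char) (hne : ws ≠ [])
    (hok : ∀ w ∈ ws, w ≠ [] ∧ ∀ a ∈ w, a ≠ '_') :
    List.dropWhile pU (joinU ws ++ y) = joinU ws ++ y := by
  cases ws with
  | nil => simp at hne
  | cons v ws' =>
    obtain ⟨hvne, hvnonU⟩ := hok v (by simp)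
    cases v with
    | nil => simp at hvne
    | cons a v' =>
      have ha : pU a = false := by
        rw [pU_eq]
        simpa using hvnonU a (by simp)
      rw [joinU_cons_general,
        show ((a :: v') ++ (if ws' = [] then [] else '_' :: joinU ws') ++ y)
          = a :: (v' ++ ((if ws' = [] then [] else '_' :: joinU ws') ++ y)) by simp,
        List.dropWhile_cons, ha]
      simp

theorem strip_pad (ws : List (List Char)) (lead tr : Bool)
    (hok : ∀ w ∈ ws, w ≠ [] ∧ ∀ a ∈ w, a ≠ '_') :
    PySem.Chars.stripChars (padLead ws lead tr) ['_'] = joinU ws := by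
  have key : ∀ l : List Char, PySem.Chars.stripChars l ['_']
      = (List.dropWhile pU (List.dropWhile pU l).reverse).reverse := fun l => rfl
  rw [key]
  have hpu : pU '_' = true := by rw [pU_eq]; simp
  have h1 : List.dropWhile pU ['_'] = [] := by
    rw [List.dropWhile_cons, hpu]; simp
  cases ws with
  | nil =>
    cases lead <;> cases tr <;> simp [padLead, joinU, h1]
  | cons v ws' =>
    have hne : (v :: ws') ≠ [] := by simp
    have hpad : padLead (v :: ws') lead tr
        = (if lead then ['_'] else []) ++ joinU (v :: ws') ++ (if tr then ['_'] else []) := rfl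
    have step1 : List.dropWhile pU (padLead (v :: ws') lead tr)
        = joinU (v :: ws') ++ (if tr then ['_'] else []) := by
      rw [hpad]
      cases lead with
      | true =>
        rw [if_pos rfl,
          show (['_'] ++ joinU (v :: ws') ++ (if tr then ['_'] else []))
            = '_' :: (joinU (v :: ws') ++ (if tr then ['_'] else [])) by simp,
          List.dropWhile_cons, hpu]
        simp only [if_true]
        exact dropWhile_pU_joinU _ _ hne hok
      | false =>
        rw [if_neg (by simp), List.nil_append]
        exact dropWhile_pU_joinU _ _ hne hok
    rw [step1]
    have hok2 : ∀ w ∈ ((v :: ws').map List.reverse).reverse, w ≠ [] ∧ ∀ a ∈ w, a ≠ '_' := by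
      intro w hw
      rw [List.mem_reverse, List.mem_map] at hw
      obtain ⟨u, hu, huw⟩ := hw
      obtain ⟨h1, h2⟩ := hok u hu
      subst huw
      exact ⟨by simpa using h1, fun a haa => h2 a (by simpa using haa)⟩
    have hne2 : ((v :: ws').map List.reverse).reverse ≠ [] := by simp
    have hdj : List.dropWhile pU (joinU (((v :: ws').map List.reverse).reverse))
        = joinU (((v :: ws').map List.reverse).reverse) := by
      have := dropWhile_pU_joinU _ [] hne2 hok2
      simpa using this
    have step2 : List.dropWhile pU ((joinU (v :: ws') ++ (if tr then ['_'] else [])).reverse)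
        = (joinU (v :: ws')).reverse := by
      rw [List.reverse_append]
      cases tr with
      | true =>
        show List.dropWhile pU ('_' :: (joinU (v :: ws')).reverse) = (joinU (v :: ws')).reverse
        rw [List.dropWhile_cons, hpu]
        simp only [if_true]
        rw [joinU_reverse, hdj, ← joinU_reverse]
      | false =>
        show List.dropWhile pU ((joinU (v :: ws')).reverse) = (joinU (v :: ws')).reverse
        rw [joinU_reverse, hdj, ← joinU_reverse]
    rw [step2, List.reverse_reverse]

theorem foldl_toks (s : List Char) : ∀ (w : List (List Char)) (cur : List Char),
    (if (s.foldl (fun st ch =>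
        if PySem.Chars.isalnum ch then (st.1, st.2 ++ [PySem.Chars.lowerChar ch])
        else if st.2 ≠ [] then (st.1 ++ [st.2], []) else st) (w, cur)).2 ≠ [] then
      (s.foldl (fun st ch =>
        if PySem.Chars.isalnum ch then (st.1, st.2 ++ [PySem.Chars.lowerChar ch])
        else if st.2 ≠ [] then (st.1 ++ [st.2], []) else st) (w, cur)).1 ++
      [(s.foldl (fun st ch =>
        if PySem.Chars.isalnum ch then (st.1, st.2 ++ [PySem.Chars.lowerChar ch])
        else if st.2 ≠ [] then (st.1 ++ [st.2], []) else st) (w, cur)).2]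
    else
      (s.foldl (fun st ch =>
        if PySem.Chars.isalnum ch then (st.1, st.2 ++ [PySem.Chars.lowerChar ch])
        else if st.2 ≠ [] then (st.1 ++ [st.2], []) else st) (w, cur)).1) = w ++ toksAux cur s := by
  induction s with
  | nil =>
    intro w cur
    rw [toksAux.eq_def]
    by_cases h : cur = [] <;> simp [h]
  | cons ch t ih =>
    intro w cur
    rw [toksAux.eq_def]
    simp only [List.foldl_cons]
    by_cases ha : PySem.Chars.isalnum ch = true
    · simp only [ha, if_true]
      exact ih w (cur ++ [PySem.Chars.lowerChar ch])
    · have ha' : PySem.Chars.isalnum ch = false := by simpa using ha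
      simp only [ha', Bool.false_eq_true, if_false]
      by_cases hc : cur = []
      · simp only [hc, ne_eq, not_true_eq_false, if_false, reduceIte]
        simpa using ih w []
      · simp only [ne_eq, hc, not_false_eq_true, if_true, if_false]
        rw [ih (w ++ [cur]) []]
        simp
theorem ports_agree (value : Option String) :
    normalize_cache_label_py value = normalize_cache_label_py_alt value := by
  cases value with
  | none => rfl
  | some v =>
    have key : PySem.Chars.stripChars
        (collapseA ((PySem.Chars.strip v.toList).map
          (fun ch => if PySem.Chars.isalnum ch then PySem.Chars.lowerChar ch else '_'))) ['_']
        = PySem.Chars.join ['_']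
          (if ((PySem.Chars.strip v.toList).foldl (fun st ch =>
              if PySem.Chars.isalnum ch then (st.1, st.2 ++ [PySem.Chars.lowerChar ch])
              else if st.2 ≠ [] then (st.1 ++ [st.2], []) else st) ([], [])).2 ≠ [] then
            ((PySem.Chars.strip v.toList).foldl (fun st ch =>
              if PySem.Chars.isalnum ch then (st.1, st.2 ++ [PySem.Chars.lowerChar ch])
              else if st.2 ≠ [] then (st.1 ++ [st.2], []) else st) ([], [])).1 ++
            [((PySem.Chars.strip v.toList).foldl (fun st ch =>
              if PySem.Chars.isalnum ch then (st.1, st.2 ++ [PySem.Chars.lowerChar ch])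
              else if st.2 ≠ [] then (st.1 ++ [st.2], []) else st) ([], [])).2]
          else
            ((PySem.Chars.strip v.toList).foldl (fun st ch =>
              if PySem.Chars.isalnum ch then (st.1, st.2 ++ [PySem.Chars.lowerChar ch])
              else if st.2 ≠ [] then (st.1 ++ [st.2], []) else st) ([], [])).1) := by
      set s := PySem.Chars.strip v.toList with hsdef
      rw [show (s.map (fun ch => if PySem.Chars.isalnum ch then PySem.Chars.lowerChar ch else '_'))
        = s.map fA from rfl]
      rw [collapseA_eq, main_pad s.length s (le_refl _),
        strip_pad _ _ _ (words_ok s [] (by simp)),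
        show ∀ ws, PySem.Chars.join ['_'] ws = List.intercalate ['_'] ws from fun _ => rfl,
        joinU_eq_intercalate, foldl_toks s [] []]
      simp
    simp only [normalize_cache_label_py, normalize_cache_label_py_alt]
    rw [key]

-- ===== VERDICT (by name: the statement is the Claim_ definition above) =====
theorem normalize_cache_label_py_spec : Claim_equal_normalize_cache_label_py := by
  intro value _
  show normalize_cache_label_py value = normalize_cache_label_py_alt value
  exact ports_agree value
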